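/- GENERATED by mk_final_copies.py from the proof of the farm's unit `start_decoder.2d` (farm:start_decoder.2d.1: Proof.lean) as the
   re-elaboration sweep compiled it — do not edit. -/
import Asan.CheckWalk
import Vorbis.Spec.Units.start_decoder_2d
import Vorbis.Spec.Worked.start_decoder_2d_Lemmas

open X86 X86.User Asan Vorbis Vorbis.Spec Vorbis.Spec.StartDecoder

namespace Vorbis.Spec.start_decoder_2d

/-- The seven stubs together: a point at any stub's entry reaches the epilogue with eax = 0. -/
theorem all_stubs {Lay : Layout} (hLay : Lay.hi = 0x1000000) {μ : Microarch} (hμ : UserX.MicroOK μ) {u₀ : State}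
    (hcode : HasCodeNat Lay u₀ Vorbis.L.start_decoder.entry Vorbis.Code.code_start_decoder.nat Vorbis.L.start_decoder.size)
    (herr : ∀ (others : List Obj) (frames : List (Nat × FrameLayout)),
      Calls Lay μ Vorbis.WayInv (Vorbis.conv u₀) Vorbis.L.error.entry (Vorbis.Spec.error.spec others frames))
    {g : Ghost} {A : Arena × List Obj} {v : State} (hst : P2.AtStub u₀ g A v) :
    ReachVia Lay μ Vorbis.WayInv v (fun w => AtERR u₀ g w) := by
  obtain ⟨pc, hpc, hpt⟩ := hst
  rcases hpc with rfl | rfl | rfl | rfl | rfl | rfl | rfl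
  · exact stub_b15 hLay hμ hcode herr hpt
  · exact stub_b7a hLay hμ hcode herr hpt
  · exact stub_b89 hLay hμ hcode herr hpt
  · exact stub_b98 hLay hμ hcode herr hpt
  · exact stub_baa hLay hμ hcode herr hpt
  · exact stub_bdc hLay hμ hcode herr hpt
  · exact stub_bfa hLay hμ hcode herr hpt

end Vorbis.Spec.start_decoder_2d

/-- Unit `start_decoder.2d`: the seven error stubs of segment `.2` of `start_decoder` take a point at a stub (`P2.AtStub`) to `AtERR`. -/
theorem Vorbis.Spec.Worked.start_decoder_2d_ok : Vorbis.Spec.start_decoder_2d.Statement := by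
  intro Lay hLay μ hμ u₀ hcode herr g A v hst
  exact Vorbis.Spec.start_decoder_2d.all_stubs hLay hμ hcode herr hst
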